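-- pv_equiv track=rewrite | github.com/romayengineer/marketface | marketface/play_dynamic.py | get_number_saparated
-- ===== SOURCE A (Python) =====
-- from typing import Optional
--
-- def get_number_saparated(priceStr: str) -> Optional[int]:
--     """
--     if number is for example 123.456123.456
--     is (123.456 + 123.456) there are two numbers
--     we get the first by getting only 3 numbers after
--     separetor either dot or comma
--     """
--     separators = (".", ",",)
--     if not priceStr or not priceStr[0].isdigit():
--         return
--     sep = None
--     number = ""
--     use_sep = False
--     counter = 0
--     for c in priceStr:
--         if c in separators:
--             sep = c
--             use_sep = True
--             counter = 0
--         if counter != 0 and counter % 4 == 0: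
--             return int(number)
--         elif c.isdigit():
--             number += c
--         if use_sep:
--             counter += 1
--     return int(number)
-- ===== SOURCE B (Python) =====
-- from typing import Optional
--
-- def get_number_saparated(priceStr: str) -> Optional[int]:
--     if not priceStr or not priceStr[0].isdigit():
--         return None
--     cutoff = len(priceStr)
--     last_sep = None
--     for i, c in enumerate(priceStr):
--         if c in ".,":
--             last_sep = i
--         elif last_sep is not None and i - last_sep == 4:
--             cutoff = i
--             break
--     return int(''.join(c for c in priceStr[:cutoff] if c.isdigit()))
-- ===== Notes on version B (the rewrite author's own statement) =====
-- stated objective: alternative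
-- what changed: A's single fused pass (stateful counter/flag loop with mid-loop early return and incremental string building) is replaced by two phases: first a scan computing only the cutoff index from the distance to the last separator, then one digit-filter over the prefix fed to int() once.
import Mathlib
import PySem

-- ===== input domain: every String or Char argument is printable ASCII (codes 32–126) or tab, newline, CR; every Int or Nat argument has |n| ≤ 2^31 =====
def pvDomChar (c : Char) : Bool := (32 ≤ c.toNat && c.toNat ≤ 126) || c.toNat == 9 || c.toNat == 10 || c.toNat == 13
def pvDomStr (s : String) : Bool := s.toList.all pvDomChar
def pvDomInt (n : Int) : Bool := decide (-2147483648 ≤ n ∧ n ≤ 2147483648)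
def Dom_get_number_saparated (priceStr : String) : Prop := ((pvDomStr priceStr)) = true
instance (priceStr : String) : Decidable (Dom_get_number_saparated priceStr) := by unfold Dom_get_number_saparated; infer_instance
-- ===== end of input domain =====

-- B replaces A's fused stateful loop by a cutoff-index scan followed by one digit filter (alternative decomposition, same cost).

-- ===== PORT A =====
-- int(number) where number is the accumulated digit string
def pvValA (number : List Char) : Option Int := PySem.Int.ofStr? (String.mk number)

-- the for-loop of A: state = (sep irrelevant to result, number, use_sep, counter); early `return int(number)` = stop
def pvGoA : List Char → List Char → Bool → Nat → Option Int
  | [], number, _, _ => pvValA number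
  | c :: rest, number, useSep, counter =>
    let useSep' := if c = '.' ∨ c = ',' then true else useSep
    let counter' := if c = '.' ∨ c = ',' then 0 else counter
    if counter' ≠ 0 ∧ counter' % 4 = 0 then pvValA number
    else
      let number' := if c.isDigit then number ++ [c] else number
      pvGoA rest number' useSep' (if useSep' then counter' + 1 else counter')

def get_number_saparated (priceStr : String) : Option Int :=
  match priceStr.toList with
  | [] => none
  | c :: _ => if ¬ c.isDigit then none else pvGoA priceStr.toList [] false 0

-- ===== PORT B =====
-- phase 1 of B: enumerate scan returning the cutoff index (default = len)
def pvGoB : List Char → Nat → Option Nat → Nat → Nat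
  | [], _, _, dflt => dflt
  | c :: rest, i, lastSep, dflt =>
    if c = '.' ∨ c = ',' then pvGoB rest (i + 1) (some i) dflt
    else
      match lastSep with
      | some j => if i - j = 4 then i else pvGoB rest (i + 1) lastSep dflt
      | none => pvGoB rest (i + 1) none dflt

def get_number_saparated_alt (priceStr : String) : Option Int :=
  match priceStr.toList with
  | [] => none
  | c :: _ =>
    if ¬ c.isDigit then none
    else
      let cutoff := pvGoB priceStr.toList 0 none priceStr.toList.length
      PySem.Int.ofStr? (String.mk (((priceStr.toList.take cutoff).filter Char.isDigit)))

-- ===== PRECONDITION & SPEC =====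
def Spec_get_number_saparated (priceStr : String) (out : Option Int) : Prop := out = get_number_saparated_alt priceStr
instance (priceStr : String) (out : Option Int) : Decidable (Spec_get_number_saparated priceStr out) := by unfold Spec_get_number_saparated; infer_instance

-- ===== CLAIM (what is proved, stated in full; the proofs are below) =====
def Claim_equal_get_number_saparated : Prop := ∀ (priceStr : String), Dom_get_number_saparated priceStr → Spec_get_number_saparated priceStr (get_number_saparated priceStr)

-- ===== LEMMAS AND PROOFS =====

-- pvGoB translates under a uniform index shift
theorem pvGoB_shift (l : List Char) (i : Nat) (ls : Option Nat) (d t : Nat) :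
    pvGoB l (i + t) ((ls.map (· + t))) (d + t) = pvGoB l i ls d + t := by
  induction l generalizing i ls with
  | nil => simp [pvGoB]
  | cons c rest ih =>
    by_cases hsep : c = '.' ∨ c = ','
    · simpa [pvGoB, hsep, Nat.add_right_comm i t 1] using ih (i + 1) (some i)
    · cases ls with
      | none => simpa [pvGoB, hsep, Nat.add_right_comm i t 1] using ih (i + 1) none
      | some j =>
        simp only [pvGoB, hsep, Option.map_some]
        rw [show i + t - (j + t) = i - j by omega]
        by_cases h4 : i - j = 4
        · simp [h4]
        · simpa [h4, Nat.add_right_comm i t 1] using ih (i + 1) (some j)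

-- the cutoff never falls below the starting index
theorem pvGoB_ge (l : List Char) (i : Nat) (ls : Option Nat) :
    i ≤ pvGoB l i ls (i + l.length) := by
  induction l generalizing i ls with
  | nil => simp [pvGoB]
  | cons c rest ih =>
    have hlen : i + (c :: rest).length = (i + 1) + rest.length := by simp; omega
    by_cases hsep : c = '.' ∨ c = ','
    · simp only [pvGoB, hsep, if_pos, hlen]
      exact le_trans (Nat.le_succ i) (ih (i + 1) (some i))
    · cases ls with
      | none =>
        simp only [pvGoB, hsep, if_neg, hlen, not_false_iff]
        exact le_trans (Nat.le_succ i) (ih (i + 1) none)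
      | some j =>
        simp only [pvGoB, hsep, if_neg, hlen, not_false_iff]
        by_cases h4 : i - j = 4
        · simp [h4]
        · simp only [h4, if_neg, not_false_iff]
          exact le_trans (Nat.le_succ i) (ih (i + 1) (some j))

-- main invariant, both separator states at once:
-- no-sep state of A ↔ lastSep = none of B; sep state with counter k (1 ≤ k ≤ 4) ↔ being k positions past the separator
theorem pvGoA_eq_none (l : List Char) (number : List Char) :
    pvGoA l number false 0 =
      pvValA (number ++ (l.take (pvGoB l 0 none l.length)).filter Char.isDigit) ∧
    ∀ k : Nat, 1 ≤ k → k ≤ 4 →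
      pvGoA l number true k =
        pvValA (number ++ (l.take (pvGoB l k (some 0) (k + l.length) - k)).filter Char.isDigit) := by
  induction l generalizing number with
  | nil => simp [pvGoA, pvGoB]
  | cons c rest ih =>
    constructor
    · -- state: useSep = false, counter = 0
      by_cases hsep : c = '.' ∨ c = ','
      · -- separator starts the window: A goes to (true, 1); B sets lastSep := some 0 at index 0
        have hnd : ¬ c.isDigit := by rcases hsep with h | h <;> simp [h, Char.isDigit]
        have hB : pvGoB (c :: rest) 0 none (c :: rest).length
            = pvGoB rest 1 (some 0) (1 + rest.length) := by
          simp [pvGoB, hsep, Nat.add_comm]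
        have hge : 1 ≤ pvGoB rest 1 (some 0) (1 + rest.length) := pvGoB_ge rest 1 (some 0)
        have hA : pvGoA (c :: rest) number false 0 = pvGoA rest number true 1 := by
          simp [pvGoA, hsep, hnd]
        rw [hA, (ih number).2 1 (by omega) (by omega), hB,
            List.take_cons (show 0 < pvGoB rest 1 (some 0) (1 + rest.length) by omega)]
        simp [hnd]
      · -- ordinary char, still no separator
        have hB : pvGoB (c :: rest) 0 none (c :: rest).length
            = pvGoB rest 1 none (rest.length + 1) := by
          simp [pvGoB, hsep]
        have hsh : pvGoB rest 1 none (rest.length + 1) = pvGoB rest 0 none rest.length + 1 := by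
          simpa using pvGoB_shift rest 0 none rest.length 1
        have hA : pvGoA (c :: rest) number false 0
            = pvGoA rest (if c.isDigit then number ++ [c] else number) false 0 := by
          simp [pvGoA, hsep]
        rw [hA, (ih _).1, hB, hsh, List.take_cons (by omega)]
        by_cases hd : c.isDigit <;> simp [hd]
    · -- state: useSep = true, counter = k ∈ [1,4]
      intro k hk1 hk4
      by_cases hsep : c = '.' ∨ c = ','
      · -- separator resets: A → (true, 1); B updates lastSep := some k at index k
        have hnd : ¬ c.isDigit := by rcases hsep with h | h <;> simp [h, Char.isDigit]
        have hB : pvGoB (c :: rest) k (some 0) (k + (c :: rest).length)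
            = pvGoB rest (k + 1) (some k) (k + 1 + rest.length) := by
          simp only [pvGoB, hsep, if_pos, List.length_cons]
          congr 1; omega
        have hshk : pvGoB rest (k + 1) (some k) (k + 1 + rest.length)
            = pvGoB rest 1 (some 0) (1 + rest.length) + k := by
          have h := pvGoB_shift rest 1 (some 0) (1 + rest.length) k
          simp only [Option.map_some] at h
          rw [show k + 1 = 1 + k from Nat.add_comm k 1,
              show 1 + k + rest.length = 1 + rest.length + k from by omega,
              show (some k : Option Nat) = some (0 + k) from by simp]
          exact h
        have hge : 1 ≤ pvGoB rest 1 (some 0) (1 + rest.length) := pvGoB_ge rest 1 (some 0)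
        have hA : pvGoA (c :: rest) number true k = pvGoA rest number true 1 := by
          simp [pvGoA, hsep, hnd]
        rw [hA, (ih number).2 1 (by omega) (by omega), hB, hshk, Nat.add_sub_cancel,
            List.take_cons (by omega)]
        simp [hnd]
      · by_cases h4 : k = 4
        · -- counter hits 4 on a non-separator: A returns; B's cutoff is here
          have hB : pvGoB (c :: rest) k (some 0) (k + (c :: rest).length) = k := by
            simp [pvGoB, hsep, h4]
          have hA : pvGoA (c :: rest) number true k = pvValA number := by
            simp [pvGoA, hsep, h4]
          rw [hA, hB]
          simp
        · -- ordinary char inside the window: counter k → k+1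
          have hB : pvGoB (c :: rest) k (some 0) (k + (c :: rest).length)
              = pvGoB rest (k + 1) (some 0) (k + 1 + rest.length) := by
            simp only [pvGoB, hsep, List.length_cons]
            rw [if_neg (by simpa using hsep), if_neg (by omega)]
            congr 1; omega
          have hge : k + 1 ≤ pvGoB rest (k + 1) (some 0) (k + 1 + rest.length) :=
            pvGoB_ge rest (k + 1) (some 0)
          have hA : pvGoA (c :: rest) number true k
              = pvGoA rest (if c.isDigit then number ++ [c] else number) true (k + 1) := by
            have hc : ¬(k ≠ 0 ∧ k % 4 = 0) := by omega
            simp [pvGoA, hsep, hc]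
          rw [hA, (ih _).2 (k + 1) (by omega) (by omega), hB,
              show pvGoB rest (k + 1) (some 0) (k + 1 + rest.length) - k
                = (pvGoB rest (k + 1) (some 0) (k + 1 + rest.length) - (k + 1)) + 1 from by omega,
              List.take_cons (by omega)]
          by_cases hd : c.isDigit <;> simp [hd]

-- ===== VERDICT (by name: the statement is the Claim_ definition above) =====
theorem get_number_saparated_spec : Claim_equal_get_number_saparated := by
  intro priceStr _
  unfold Spec_get_number_saparated get_number_saparated get_number_saparated_alt
  cases h : priceStr.toList with
  | nil => rfl
  | cons c rest =>
    by_cases hd : c.isDigit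
    · simp only [hd, not_true, if_neg, not_false_iff]
      have := (pvGoA_eq_none (c :: rest) []).1
      simpa using this
    · simp [hd]
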